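-- pv_equiv track=rewrite | github.com/SahanWeerasiri/web-domain-scanner | src/modules/domain_enumeration/dns_enumeration_module/dns_enumeration.py | _clean_txt_word
-- ===== SOURCE A (Python) =====
-- def _clean_txt_word(word: str) -> str:
--     """Clean word extracted from TXT record"""
--     cleaned = word.lower()
--
--     # Remove common prefixes/suffixes
--     prefixes = ['http://', 'https://', 'ftp://']
--     for prefix in prefixes:
--         if cleaned.startswith(prefix):
--             cleaned = cleaned[len(prefix):]
--
--     # Remove paths and parameters
--     separators = ['/', '?', ':', '#']
--     for sep in separators:
--         if sep in cleaned:
--             cleaned = cleaned.split(sep)[0]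
--
--     return cleaned
-- ===== SOURCE B (Python) =====
-- def _clean_txt_word(word: str) -> str:
--     """Clean word extracted from TXT record"""
--     cleaned = word.lower()
--
--     # Remove common prefixes/suffixes
--     prefixes = ['http://', 'https://', 'ftp://']
--     for prefix in prefixes:
--         if cleaned.startswith(prefix):
--             cleaned = cleaned[len(prefix):]
--
--     # Truncate at the first path/parameter separator in a single pass
--     out = []
--     for ch in cleaned:
--         if ch in '/?:#':
--             break
--         out.append(ch)
--     return ''.join(out)
-- ===== Notes on version B (the rewrite author's own statement) =====
-- stated objective: simpler
-- what changed: The four sequential split-and-reassign passes over the separator list are replaced by one single-pass truncation at the first separator character.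
import Mathlib
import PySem

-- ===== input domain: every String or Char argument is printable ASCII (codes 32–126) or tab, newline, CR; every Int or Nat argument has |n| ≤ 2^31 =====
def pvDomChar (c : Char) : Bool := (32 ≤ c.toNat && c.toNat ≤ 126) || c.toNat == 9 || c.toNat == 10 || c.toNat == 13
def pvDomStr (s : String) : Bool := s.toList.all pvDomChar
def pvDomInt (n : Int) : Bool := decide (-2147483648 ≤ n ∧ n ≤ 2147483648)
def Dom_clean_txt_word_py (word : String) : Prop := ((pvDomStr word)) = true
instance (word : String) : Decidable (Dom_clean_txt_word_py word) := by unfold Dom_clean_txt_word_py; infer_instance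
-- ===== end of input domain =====

-- B replaces A's four sequential split-and-reassign passes over the separator list by one
-- single-pass truncation at the first separator character (objective: simpler).

-- ===== PORT A =====
-- shared by both ports: the prefix-stripping loop, textually identical in A and B
def pvPrefixes : List String := ["http://", "https://", "ftp://"]

def pvStripPrefix (c p : String) : String :=
  if PySem.Str.startswith c p then PySem.Str.slice c (some (PySem.Str.len p)) none else c

def pvSeps : List String := ["/", "?", ":", "#"]

-- one iteration of A's separator loop: if sep in cleaned: cleaned = cleaned.split(sep)[0]
def pvCutSep (c sep : String) : String :=
  if PySem.Str.isIn sep c then ((PySem.Str.split? c sep).getD []).headD "" else c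

def clean_txt_word_py (word : String) : String :=
  let cleaned := PySem.Str.lower word
  let cleaned := pvPrefixes.foldl pvStripPrefix cleaned
  pvSeps.foldl pvCutSep cleaned

-- ===== PORT B =====
def pvSepChars : List Char := ['/', '?', ':', '#']

def clean_txt_word_py_alt (word : String) : String :=
  let cleaned := PySem.Str.lower word
  let cleaned := pvPrefixes.foldl pvStripPrefix cleaned
  -- single char loop with break = takeWhile; ''.join(out) = String.ofList
  String.ofList (cleaned.toList.takeWhile (fun ch => !(pvSepChars.contains ch)))

-- ===== PRECONDITION & SPEC =====
def Spec_clean_txt_word_py (word : String) (out : String) : Prop := out = clean_txt_word_py_alt word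
instance (word : String) (out : String) : Decidable (Spec_clean_txt_word_py word out) := by unfold Spec_clean_txt_word_py; infer_instance

-- ===== CLAIM (what is proved, stated in full; the proofs are below) =====
def Claim_equal_clean_txt_word_py : Prop := ∀ (word : String), Dom_clean_txt_word_py word → Spec_clean_txt_word_py word (clean_txt_word_py word)

-- ===== LEMMAS AND PROOFS =====

-- once the accumulator is nonempty, the head of splitOn.go's result is the earliest piece
theorem pv_go_head_acc (sep : List Char) (fuel : Nat) (l cur : List Char)
    (acc : List (List Char)) (x : List Char) :
    (PySem.Chars.splitOn.go sep fuel l cur (acc ++ [x])).head? = some x := by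
  induction fuel generalizing l cur acc with
  | zero =>
    rw [PySem.Chars.splitOn.go]
    rw [List.head?_reverse, ← List.cons_append, List.getLast?_concat]
  | succ fuel ih =>
    cases l with
    | nil =>
      rw [PySem.Chars.splitOn.go]
      · rw [List.head?_reverse, ← List.cons_append, List.getLast?_concat]
      · omega
    | cons c rest =>
      rw [PySem.Chars.splitOn.go]
      split
      · rw [← List.cons_append]; exact ih _ _ _
      · exact ih _ _ _

-- the head of splitOn.go on a single-character separator is takeWhile (· ≠ a)
theorem pv_go_head (a : Char) (fuel : Nat) (l cur : List Char) (h : l.length ≤ fuel) :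
    (PySem.Chars.splitOn.go [a] fuel l cur []).head? =
      some (cur.reverse ++ l.takeWhile (fun c => !(c == a))) := by
  induction fuel generalizing l cur with
  | zero =>
    have : l = [] := List.length_eq_zero_iff.mp (Nat.le_zero.mp h)
    subst this
    rw [PySem.Chars.splitOn.go]
    simp
  | succ fuel ih =>
    cases l with
    | nil =>
      rw [PySem.Chars.splitOn.go]
      · simp
      · omega
    | cons c rest =>
      rw [PySem.Chars.splitOn.go]
      by_cases hca : a = c
      · subst hca
        have hpre : [a].isPrefixOf (a :: rest) = true := by simp [List.isPrefixOf]
        rw [if_pos hpre]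
        have := pv_go_head_acc [a] fuel (List.drop [a].length (a :: rest)) [] [] cur.reverse
        simpa [List.takeWhile_cons] using this
      · have hpre : [a].isPrefixOf (c :: rest) = false := by
          simp [List.isPrefixOf]
          exact hca
        rw [if_neg (by simp [hpre])]
        rw [ih rest (c :: cur) (by simpa using Nat.le_of_succ_le_succ (by simpa using h))]
        have hne : (!(c == a)) = true := by simp; exact fun hh => absurd hh (fun q => hca q.symm)
        simp [hne]

-- one pass of A's separator loop equals truncation at the first occurrence of that character
theorem pvCutSep_eq (c : String) (a : Char) :
    pvCutSep c (String.ofList [a]) =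
      String.ofList (c.toList.takeWhile (fun ch => !(ch == a))) := by
  unfold pvCutSep
  by_cases hin : PySem.Str.isIn (String.ofList [a]) c = true
  · rw [if_pos hin]
    have hsplit : PySem.Str.split? c (String.ofList [a]) =
        Option.map (List.map String.ofList) (PySem.Chars.split? c.toList [a]) := by
      simp [PySem.Str.split?]
    have hso : PySem.Chars.split? c.toList [a] = some (PySem.Chars.splitOn c.toList [a]) := by
      simp [PySem.Chars.split?]
    rw [hsplit, hso]
    have hh := pv_go_head a (c.toList.length + 1) c.toList [] (by omega)
    unfold PySem.Chars.splitOn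
    cases hgo : PySem.Chars.splitOn.go [a] (c.toList.length + 1) c.toList [] [] with
    | nil => rw [hgo] at hh; simp at hh
    | cons w ws =>
      rw [hgo] at hh
      simp at hh
      simp [hh]
  · rw [if_neg hin]
    have hin' : PySem.Chars.isIn [a] c.toList = false := by
      have := PySem.Str.isIn_eq (String.ofList [a]) c
      rw [String.toList_ofList] at this
      rw [← this]
      exact Bool.eq_false_iff.mpr hin
    have hnm : a ∉ c.toList := by
      intro hm
      exact (PySem.Chars.isIn_eq_false_iff [a] c.toList).mp hin'
        ((List.singleton_infix_iff a c.toList).mpr hm)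
    have : c.toList.takeWhile (fun ch => !(ch == a)) = c.toList :=
      List.takeWhile_eq_self_iff.mpr (by
        intro x hx
        simp
        intro hq
        exact hnm (hq ▸ hx))
    rw [this, String.ofList_toList]

-- the whole separator loop is one takeWhile over the four separator characters
theorem pvSepFold_eq (c : String) :
    pvSeps.foldl pvCutSep c =
      String.ofList (c.toList.takeWhile (fun ch => !(pvSepChars.contains ch))) := by
  have h1 : ("/" : String) = String.ofList ['/'] := rfl
  have h2 : ("?" : String) = String.ofList ['?'] := rfl
  have h3 : (":" : String) = String.ofList [':'] := rfl
  have h4 : ("#" : String) = String.ofList ['#'] := rfl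
  unfold pvSeps
  simp only [List.foldl_cons, List.foldl_nil]
  rw [h1, h2, h3, h4, pvCutSep_eq, pvCutSep_eq, pvCutSep_eq, pvCutSep_eq]
  rw [String.toList_ofList, String.toList_ofList, String.toList_ofList]
  rw [List.takeWhile_takeWhile, List.takeWhile_takeWhile, List.takeWhile_takeWhile]
  congr 1
  congr 1
  funext x
  simp [pvSepChars]
  ac_rfl

-- ===== VERDICT (by name: the statement is the Claim_ definition above) =====
theorem clean_txt_word_py_spec : Claim_equal_clean_txt_word_py := by
  intro word _
  show clean_txt_word_py word = clean_txt_word_py_alt word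
  simp only [clean_txt_word_py, clean_txt_word_py_alt]
  exact pvSepFold_eq _
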